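-- pv_equiv track=rewrite | github.com/odoo/odoo | custom-addons/l10n_be_hr_payroll/wizard/hr_payroll_employee_departure_notice.py | _find_week
-- ===== SOURCE A (Python) =====
-- def _find_week(duration_worked_month, leaving_type_id):
--     if leaving_type_id == 'resigned':
--         duration_notice = [
--             (3, 1), (6, 2), (12, 3), (18, 4), (24, 5), (48, 6), (60, 7), (72, 9),
--             (84, 10), (96, 12), (1000, 13)]
--     else:
--         duration_notice = [
--             (3, 1), (4, 3), (5, 4), (6, 5), (9, 6), (12, 7), (15, 8), (18, 9),
--             (21, 10), (24, 11), (36, 12), (48, 13), (60, 15), (72, 18), (84, 21), (96, 24),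
--             (108, 27), (120, 30), (132, 33), (144, 36), (156, 39), (168, 42), (180, 45), (192, 48),
--             (204, 51), (216, 54), (228, 57), (240, 60), (252, 62), (264, 63), (276, 64), (288, 65)]
--     for duration in duration_notice:
--         last_valid = duration[1]
--         if duration[0] > duration_worked_month:
--             return last_valid
--     return last_valid
-- ===== SOURCE B (Python) =====
-- def _find_week(duration_worked_month, leaving_type_id):
--     if leaving_type_id == 'resigned':
--         thresholds = [3, 6, 12, 18, 24, 48, 60, 72, 84, 96, 1000]
--         weeks = [1, 2, 3, 4, 5, 6, 7, 9, 10, 12, 13]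
--     else:
--         thresholds = [3, 4, 5, 6, 9, 12, 15, 18, 21, 24, 36, 48, 60, 72, 84, 96,
--                       108, 120, 132, 144, 156, 168, 180, 192, 204, 216, 228, 240,
--                       252, 264, 276, 288]
--         weeks = [1, 3, 4, 5, 6, 7, 8, 9, 10, 11, 12, 13, 15, 18, 21, 24,
--                  27, 30, 33, 36, 39, 42, 45, 48, 51, 54, 57, 60, 62, 63, 64, 65]
--     # binary search: first index whose threshold strictly exceeds the input
--     lo, hi = 0, len(thresholds)
--     while lo < hi:
--         mid = (lo + hi) // 2
--         if duration_worked_month < thresholds[mid]: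
--             hi = mid
--         else:
--             lo = mid + 1
--     return weeks[lo] if lo < len(weeks) else weeks[-1]
-- ===== Notes on version B (the rewrite author's own statement) =====
-- stated objective: alternative
-- what changed: Replaced the linear scan of the (threshold, weeks) pair table with a bisect_right-style binary search over parallel sorted threshold and weeks lists, clamping the index to the last entry.
import Mathlib
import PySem

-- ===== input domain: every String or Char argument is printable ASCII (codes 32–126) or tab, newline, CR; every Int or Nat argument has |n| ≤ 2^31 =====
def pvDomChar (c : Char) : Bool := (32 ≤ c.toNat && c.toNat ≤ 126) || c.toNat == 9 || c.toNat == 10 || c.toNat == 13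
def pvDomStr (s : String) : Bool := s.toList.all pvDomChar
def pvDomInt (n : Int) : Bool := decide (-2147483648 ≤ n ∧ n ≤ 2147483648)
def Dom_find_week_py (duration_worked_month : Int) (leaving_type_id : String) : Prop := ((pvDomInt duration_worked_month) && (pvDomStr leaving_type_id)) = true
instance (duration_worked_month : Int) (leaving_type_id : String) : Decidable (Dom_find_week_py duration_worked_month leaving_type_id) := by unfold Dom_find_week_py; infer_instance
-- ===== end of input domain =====

-- B replaces A's linear scan of the (threshold, weeks) table by a bisect_right-style
-- binary search over parallel sorted threshold/weeks lists (alternative decomposition).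
-- ===== PORT A =====
def scanA : List (Int × Int) → Int → Int → Int
  | [], _, last_valid => last_valid
  | d :: rest, x, _ =>
      let last_valid := d.2
      if d.1 > x then last_valid else scanA rest x last_valid

def tableResigned : List (Int × Int) :=
  [(3, 1), (6, 2), (12, 3), (18, 4), (24, 5), (48, 6), (60, 7), (72, 9),
   (84, 10), (96, 12), (1000, 13)]

def tableFired : List (Int × Int) :=
  [(3, 1), (4, 3), (5, 4), (6, 5), (9, 6), (12, 7), (15, 8), (18, 9),
   (21, 10), (24, 11), (36, 12), (48, 13), (60, 15), (72, 18), (84, 21), (96, 24),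
   (108, 27), (120, 30), (132, 33), (144, 36), (156, 39), (168, 42), (180, 45), (192, 48),
   (204, 51), (216, 54), (228, 57), (240, 60), (252, 62), (264, 63), (276, 64), (288, 65)]

def find_week_py (duration_worked_month : Int) (leaving_type_id : String) : Int :=
  let duration_notice :=
    if leaving_type_id == "resigned" then tableResigned else tableFired
  scanA duration_notice duration_worked_month 0

-- ===== PORT B =====
-- fuel-indexed port of B's while loop; fuel = ts.length bounds the iterations
def brLoop (ts : List Int) (x : Int) : Nat → Nat → Nat → Nat
  | 0, lo, _ => lo
  | fuel + 1, lo, hi =>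
      if lo < hi then
        let mid := (lo + hi) / 2
        if x < ts.getD mid 0 then brLoop ts x fuel lo mid
        else brLoop ts x fuel (mid + 1) hi
      else lo

def thresholdsResigned : List Int := [3, 6, 12, 18, 24, 48, 60, 72, 84, 96, 1000]
def weeksResigned : List Int := [1, 2, 3, 4, 5, 6, 7, 9, 10, 12, 13]
def thresholdsFired : List Int :=
  [3, 4, 5, 6, 9, 12, 15, 18, 21, 24, 36, 48, 60, 72, 84, 96,
   108, 120, 132, 144, 156, 168, 180, 192, 204, 216, 228, 240, 252, 264, 276, 288]
def weeksFired : List Int :=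
  [1, 3, 4, 5, 6, 7, 8, 9, 10, 11, 12, 13, 15, 18, 21, 24,
   27, 30, 33, 36, 39, 42, 45, 48, 51, 54, 57, 60, 62, 63, 64, 65]

def find_week_py_alt (duration_worked_month : Int) (leaving_type_id : String) : Int :=
  let p := if leaving_type_id == "resigned" then (thresholdsResigned, weeksResigned)
           else (thresholdsFired, weeksFired)
  let ts := p.1
  let ws := p.2
  let lo := brLoop ts duration_worked_month ts.length 0 ts.length
  if lo < ws.length then ws.getD lo 0 else ws.getD (ws.length - 1) 0

-- ===== PRECONDITION & SPEC =====
def Spec_find_week_py (duration_worked_month : Int) (leaving_type_id : String) (out : Int) : Prop := out = find_week_py_alt duration_worked_month leaving_type_id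
instance (duration_worked_month : Int) (leaving_type_id : String) (out : Int) : Decidable (Spec_find_week_py duration_worked_month leaving_type_id out) := by unfold Spec_find_week_py; infer_instance

-- ===== CLAIM (what is proved, stated in full; the proofs are below) =====
def Claim_equal_find_week_py : Prop := ∀ (duration_worked_month : Int) (leaving_type_id : String), Dom_find_week_py duration_worked_month leaving_type_id → Spec_find_week_py duration_worked_month leaving_type_id (find_week_py duration_worked_month leaving_type_id)

-- ===== LEMMAS AND PROOFS =====
theorem countP_zero_of_gt (x : Int) (l : List Int) (h : ∀ b ∈ l, x < b) :
    l.countP (fun t => decide (t ≤ x)) = 0 := by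
  rw [List.countP_eq_zero]
  intro a ha
  simpa using not_le.mpr (h a ha)

theorem countP_prefix_le (x : Int) : ∀ (ts : List Int), ts.Pairwise (· ≤ ·) →
    ∀ i, i < ts.countP (fun t => decide (t ≤ x)) → ts.getD i 0 ≤ x := by
  intro ts
  induction ts with
  | nil => intro _ i hi; simp at hi
  | cons a l ih =>
    intro h i hi
    rw [List.pairwise_cons] at h
    by_cases hax : a ≤ x
    · cases i with
      | zero => simpa using hax
      | succ j =>
        simp only [List.countP_cons, hax, decide_true, if_true] at hi
        simpa using ih h.2 j (by omega)
    · have h0 : l.countP (fun t => decide (t ≤ x)) = 0 :=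
        countP_zero_of_gt x l (fun b hb => lt_of_lt_of_le (not_le.mp hax) (h.1 b hb))
      simp only [List.countP_cons, hax, decide_false, h0] at hi
      simp at hi
theorem countP_suffix_gt (x : Int) : ∀ (ts : List Int), ts.Pairwise (· ≤ ·) →
    ∀ i, ts.countP (fun t => decide (t ≤ x)) ≤ i → i < ts.length → x < ts.getD i 0 := by
  intro ts
  induction ts with
  | nil => intro _ i _ hi; simp at hi
  | cons a l ih =>
    intro h i hc hi
    rw [List.pairwise_cons] at h
    by_cases hax : a ≤ x
    · simp only [List.countP_cons, hax, decide_true, if_true] at hc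
      cases i with
      | zero => omega
      | succ j => simpa using ih h.2 j (by omega) (by simpa using hi)
    · cases i with
      | zero => simpa using not_le.mp hax
      | succ j =>
        have h0 : l.countP (fun t => decide (t ≤ x)) = 0 :=
          countP_zero_of_gt x l (fun b hb => lt_of_lt_of_le (not_le.mp hax) (h.1 b hb))
        simpa using ih h.2 j (by omega) (by simpa using hi)

theorem brLoop_eq_countP (ts : List Int) (x : Int) (h : ts.Pairwise (· ≤ ·)) :
    ∀ fuel lo hi, lo ≤ ts.countP (fun t => decide (t ≤ x)) →
      ts.countP (fun t => decide (t ≤ x)) ≤ hi → hi ≤ ts.length → hi - lo ≤ fuel →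
      brLoop ts x fuel lo hi = ts.countP (fun t => decide (t ≤ x)) := by
  intro fuel
  induction fuel with
  | zero => intro lo hi h1 h2 _ h4; simp only [brLoop]; omega
  | succ f ih =>
    intro lo hi h1 h2 h3 h4
    rw [brLoop]
    by_cases hlh : lo < hi
    · rw [if_pos hlh]
      by_cases hmid : x < ts.getD ((lo + hi) / 2) 0
      · rw [if_pos hmid]
        have : ts.countP (fun t => decide (t ≤ x)) ≤ (lo + hi) / 2 := by
          by_contra hc
          exact absurd (countP_prefix_le x ts h _ (by omega)) (not_le.mpr hmid)
        exact ih lo _ h1 this (by omega) (by omega)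
      · rw [if_neg hmid]
        have : (lo + hi) / 2 < ts.countP (fun t => decide (t ≤ x)) := by
          by_contra hc
          exact hmid (countP_suffix_gt x ts h _ (by omega) (by omega))
        exact ih _ hi (by omega) h2 h3 (by omega)
    · rw [if_neg hlh]; omega

theorem scanA_spec (x : Int) : ∀ (ps : List (Int × Int)) (d : Int),
    ps.Pairwise (fun a b => a.1 ≤ b.1) →
    scanA ps x d = (ps.map Prod.snd).getD (ps.countP (fun p => decide (p.1 ≤ x)))
      ((ps.map Prod.snd).getLastD d) := by
  intro ps
  induction ps with
  | nil => intro d _; simp [scanA]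
  | cons p rest ih =>
    intro d h
    rw [List.pairwise_cons] at h
    by_cases hpx : p.1 ≤ x
    · have : ¬ (p.1 > x) := not_lt.mpr hpx
      simp only [scanA, this, if_false, List.countP_cons, hpx, decide_true, if_true,
        List.map_cons, List.getLastD_cons, List.getD_cons_succ]
      exact ih p.2 h.2
    · have h0 : rest.countP (fun p => decide (p.1 ≤ x)) = 0 := by
        rw [List.countP_eq_zero]
        intro a ha
        simpa using not_le.mpr (lt_of_lt_of_le (not_le.mp hpx) (h.1 a ha))
      simp only [scanA, gt_iff_lt, not_le.mp hpx, if_pos, List.countP_cons, hpx,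
        decide_false, h0, List.map_cons]
      simp


theorem assemble (x : Int) (ps : List (Int × Int)) (hne : ps ≠ [])
    (h : ps.Pairwise (fun a b => a.1 ≤ b.1)) :
    scanA ps x 0 =
      (let ts := ps.map Prod.fst
       let ws := ps.map Prod.snd
       let lo := brLoop ts x ts.length 0 ts.length
       if lo < ws.length then ws.getD lo 0 else ws.getD (ws.length - 1) 0) := by
  simp only []
  set ts := ps.map Prod.fst with hts
  set ws := ps.map Prod.snd with hws
  have hsort : ts.Pairwise (· ≤ ·) := h.map Prod.fst (fun a b hab => hab)
  have hcnt : ts.countP (fun t => decide (t ≤ x)) = ps.countP (fun p => decide (p.1 ≤ x)) := by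
    rw [hts, List.countP_map]; rfl
  have hcle : ps.countP (fun p => decide (p.1 ≤ x)) ≤ ps.length := List.countP_le_length
  have hbr : brLoop ts x ts.length 0 ts.length = ps.countP (fun p => decide (p.1 ≤ x)) := by
    rw [brLoop_eq_countP ts x hsort ts.length 0 ts.length (by omega)
      (by rw [hcnt]; simpa [hts] using hcle) (le_refl _) (by omega)]
    exact hcnt
  rw [hbr, scanA_spec x ps 0 h]
  have hlen : ws.length = ps.length := by rw [hws, List.length_map]
  rcases Nat.lt_or_ge (ps.countP (fun p => decide (p.1 ≤ x))) ps.length with hc | hc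
  · rw [if_pos (by omega)]
    rw [List.getD_eq_getElem ws _ (by omega), List.getD_eq_getElem ws _ (by omega)]
  · have hceq : ps.countP (fun p => decide (p.1 ≤ x)) = ps.length := by omega
    rw [if_neg (by omega), hceq]
    have hwne : ws ≠ [] := by
      rw [hws]; simpa using hne
    have hlpos : 0 < ws.length := List.length_pos_iff.mpr hwne
    rw [← hlen]
    rw [List.getD_eq_default ws _ (by omega)]
    rw [List.getD_eq_getElem ws _ (by omega)]
    rw [List.getLastD_eq_getLast?, List.getLast?_eq_getElem?,
      List.getElem?_eq_getElem (by rw [← hws]; omega), Option.getD_some]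

theorem branch_resigned (x : Int) : scanA tableResigned x 0 = find_week_py_alt x "resigned" := by
  have h1 : thresholdsResigned = tableResigned.map Prod.fst := by rfl
  have h2 : weeksResigned = tableResigned.map Prod.snd := by rfl
  have := assemble x tableResigned (by decide) (by decide)
  simpa [find_week_py_alt, h1, h2] using this

theorem branch_fired (x : Int) (s : String) (h : (s == "resigned") = false) :
    scanA tableFired x 0 = find_week_py_alt x s := by
  have h1 : thresholdsFired = tableFired.map Prod.fst := by rfl
  have h2 : weeksFired = tableFired.map Prod.snd := by rfl
  have := assemble x tableFired (by decide) (by decide)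
  simpa [find_week_py_alt, h, h1, h2] using this

-- ===== VERDICT (by name: the statement is the Claim_ definition above) =====
theorem find_week_py_spec : Claim_equal_find_week_py := by
  intro x s _
  unfold Spec_find_week_py find_week_py
  by_cases h : (s == "resigned") = true
  · rw [if_pos h]
    have hs : s = "resigned" := eq_of_beq h
    subst hs
    exact branch_resigned x
  · have h' : (s == "resigned") = false := eq_false_of_ne_true h
    rw [h', if_neg (by simp)]
    exact branch_fired x s h'
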